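-- pv_equiv track=rewrite | github.com/zeomzzz/python-algorithm-study | BOJ/Silver/15665.py | solution
-- ===== SOURCE A (Python) =====
-- def solution(N, M, Arr) :
--   # set 이용하여 중복 제거
--   arr = sorted(list(set(Arr)))
--   ans = []
--
--   if M == 1 :
--     for i in arr :
--       ans.append([i])
--   else :
--     for i in solution(N, M-1, Arr) :
--
--       for j in arr :
--         tmp_arr = i[:]
--         tmp_arr.append(j)
--         ans.append(tmp_arr)
--
--   return ans
-- ===== SOURCE B (Python) =====
-- def solution(N, M, Arr):
--     # Iterative Cartesian-product build instead of recursion on M.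
--     arr = sorted(set(Arr))
--     result = [[]]
--     for _ in range(M):
--         result = [p + [j] for p in result for j in arr]
--     return result
-- ===== Notes on version B (the rewrite author's own statement) =====
-- stated objective: simpler
-- what changed: Replaces A's recursion on M (which infinitely recurses for M<=0) with an iterative loop that rebuilds the list of prefixes M times via a comprehension over the Cartesian product.
import Mathlib
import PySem

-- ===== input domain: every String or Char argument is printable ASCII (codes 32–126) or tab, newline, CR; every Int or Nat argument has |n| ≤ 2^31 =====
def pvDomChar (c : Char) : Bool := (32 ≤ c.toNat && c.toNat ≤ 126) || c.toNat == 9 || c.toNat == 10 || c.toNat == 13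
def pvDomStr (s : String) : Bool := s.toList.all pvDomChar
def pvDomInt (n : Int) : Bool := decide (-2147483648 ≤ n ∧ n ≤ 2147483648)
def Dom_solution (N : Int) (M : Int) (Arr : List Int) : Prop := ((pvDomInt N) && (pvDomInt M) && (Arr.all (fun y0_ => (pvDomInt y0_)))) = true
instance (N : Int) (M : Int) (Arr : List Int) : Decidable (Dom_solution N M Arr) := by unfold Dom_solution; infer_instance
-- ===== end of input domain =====

-- B replaces A's recursion on M by an iterative Cartesian-product build; equal output, same order.

-- ===== PORT A =====
-- Literal port of A's recursion on M. Python infinitely recurses for M ≤ 0 (RecursionError);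
-- the 'M ≤ 0 → []' guard only makes the Lean function total there (outside Pre_).
def solution (N : Int) (M : Int) (Arr : List Int) : List (List Int) :=
  let arr := PySem.List.sorted (PySem.Set.ofList Arr) (fun x => x) false
  if M == 1 then
    arr.map (fun i => [i])
  else if M ≤ 0 then []  -- totality guard: Python raises RecursionError here
  else
    (solution N (M-1) Arr).flatMap (fun i => arr.map (fun j => i ++ [j]))
termination_by M.toNat
decreasing_by
  simp only [beq_iff_eq] at *
  omega

-- ===== PORT B =====
def solution_alt (N : Int) (M : Int) (Arr : List Int) : List (List Int) :=
  let arr := PySem.List.sorted (PySem.Set.ofList Arr) (fun x => x) false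
  (List.range M.toNat).foldl
    (fun result _ => result.flatMap (fun p => arr.map (fun j => p ++ [j]))) [[]]

-- ===== PRECONDITION & SPEC =====
-- A infinitely recurses (RecursionError) for M ≤ 0, so those inputs are excluded.
def Pre_solution (N : Int) (M : Int) (Arr : List Int) : Prop := 1 ≤ M
instance (N : Int) (M : Int) (Arr : List Int) : Decidable (Pre_solution N M Arr) := by unfold Pre_solution; infer_instance
def pvWitness_solution : Int × Int × List Int := (3, 2, [2, 1, 2])

def Spec_solution (N : Int) (M : Int) (Arr : List Int) (out : List (List Int)) : Prop := out = solution_alt N M Arr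
instance (N : Int) (M : Int) (Arr : List Int) (out : List (List Int)) : Decidable (Spec_solution N M Arr out) := by unfold Spec_solution; infer_instance

-- ===== CLAIM (what is proved, stated in full; the proofs are below) =====
def Claim_equal_solution : Prop := ∀ (N : Int) (M : Int) (Arr : List Int), Dom_solution N M Arr → Pre_solution N M Arr → Spec_solution N M Arr (solution N M Arr)

-- ===== LEMMAS AND PROOFS =====

theorem solution_eq_alt (N : Int) (M : Int) (Arr : List Int) (h : 1 ≤ M) :
    solution N M Arr = solution_alt N M Arr := by
  obtain ⟨k, hk⟩ : ∃ k : Nat, M = (k : Int) + 1 := ⟨(M - 1).toNat, by omega⟩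
  subst hk
  induction k with
  | zero =>
    rw [solution]
    simp [solution_alt, List.range_succ, List.flatMap_cons]
  | succ k ih =>
    rw [solution]
    have h1 : (((k + 1 : Nat) : Int) + 1 == 1) = false := by simp; omega
    have h2 : ¬ (((k + 1 : Nat) : Int) + 1 ≤ 0) := by push_cast; omega
    simp only [h1, if_neg h2]
    have harg : ((k + 1 : Nat) : Int) + 1 - 1 = (k : Int) + 1 := by push_cast; ring
    rw [harg, ih (by omega)]
    have hn : (((k + 1 : Nat) : Int) + 1).toNat = ((k : Int) + 1).toNat + 1 := by omega
    simp only [solution_alt, hn, List.range_succ, List.foldl_append, List.foldl_cons,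
      List.foldl_nil]
    simp

-- ===== VERDICT (by name: the statement is the Claim_ definition above) =====
theorem solution_spec : Claim_equal_solution := by
  intro N M Arr _ hpre
  exact solution_eq_alt N M Arr hpre
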